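-- pv_equiv track=rewrite | github.com/Godo78/Projet-Programmation | swap_puzzle/grid.py | heuristique
-- ===== SOURCE A (Python) =====
-- def heuristique(M):
--     c=0
--     for i in range(1,len(M)*len(M[0]) + 1):
--         for k in range(len(M)):
--             for j in range(len(M[0])):
--                 if M[k][j] == i:
--                     indice_ligne = (i-1)//len(M)
--                     indice_colonne = (i-1)%len(M)
--                     c += abs(indice_ligne - k) + abs(indice_colonne - j)
--     return c
-- ===== SOURCE B (Python) =====
-- def heuristique(M):
--     n = len(M)
--     w = len(M[0])
--     total = n * w
--     c = 0
--     for k, row in enumerate(M):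
--         for j in range(w):
--             v = row[j]
--             if 1 <= v <= total:
--                 c += abs((v - 1) // n - k) + abs((v - 1) % n - j)
--     return c
-- ===== Notes on version B (the rewrite author's own statement) =====
-- stated objective: faster
-- what changed: Instead of scanning the whole grid once for every target value i in 1..n*m (three nested loops), B makes a single pass over the cells and adds each cell's displacement from the target position computed directly from its value.
import Mathlib
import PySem

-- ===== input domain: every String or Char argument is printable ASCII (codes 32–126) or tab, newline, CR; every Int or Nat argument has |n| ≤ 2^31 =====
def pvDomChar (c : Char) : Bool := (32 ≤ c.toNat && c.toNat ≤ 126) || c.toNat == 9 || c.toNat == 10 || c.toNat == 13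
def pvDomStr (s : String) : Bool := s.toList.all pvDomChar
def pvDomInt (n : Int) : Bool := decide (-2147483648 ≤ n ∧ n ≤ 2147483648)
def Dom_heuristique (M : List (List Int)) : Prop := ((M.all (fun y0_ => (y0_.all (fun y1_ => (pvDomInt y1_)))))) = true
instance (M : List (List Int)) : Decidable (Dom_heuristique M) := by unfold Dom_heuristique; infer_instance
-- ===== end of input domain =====

-- B replaces A's value-by-value rescans of the grid (O((n*m)^2)) by one direct pass over the
-- cells (O(n*m)); same return value wherever A returns.

-- ===== PORT A =====
-- literal transliteration of A's triple loop; M[k][j] is always in range on Pre_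
def heuristique (M : List (List Int)) : Int :=
  (PySem.List.pyRange 1 ((M.length : Int) * ((M.headD []).length : Int) + 1) 1).foldl (fun c i =>
    (PySem.List.pyRange 0 (M.length : Int) 1).foldl (fun c k =>
      (PySem.List.pyRange 0 ((M.headD []).length : Int) 1).foldl (fun c j =>
        if PySem.List.pyGetD (PySem.List.pyGetD M k []) j 0 = i then
          c + |PySem.Int.floordiv (i - 1) (M.length : Int) - k|
            + |PySem.Int.mod (i - 1) (M.length : Int) - j|
        else c) c) c) 0

-- ===== PORT B =====
-- literal transliteration of Source B: one pass over enumerate(M), target position from the value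
def heuristique_alt (M : List (List Int)) : Int :=
  let n : Int := M.length
  let w : Int := ((M.headD []).length : Int)
  let total : Int := n * w
  (PySem.List.enumerate M 0).foldl (fun c kr =>
    (PySem.List.pyRange 0 w 1).foldl (fun c j =>
      let v := PySem.List.pyGetD kr.2 j 0
      if 1 ≤ v ∧ v ≤ total then
        c + |PySem.Int.floordiv (v - 1) n - kr.1| + |PySem.Int.mod (v - 1) n - j|
      else c) c) 0

-- ===== PRECONDITION & SPEC =====
-- Pre_ excludes exactly the inputs where A raises IndexError: the empty grid (len(M[0]))
-- and grids where some row is shorter than the first row (M[k][j]).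
def Pre_heuristique (M : List (List Int)) : Prop :=
  M ≠ [] ∧ ∀ row ∈ M, (M.headD []).length ≤ row.length
instance (M : List (List Int)) : Decidable (Pre_heuristique M) := by
  unfold Pre_heuristique; infer_instance
def pvWitness_heuristique : List (List Int) := [[3, 1], [2, 4]]

def Spec_heuristique (M : List (List Int)) (out : Int) : Prop := out = heuristique_alt M
instance (M : List (List Int)) (out : Int) : Decidable (Spec_heuristique M out) := by unfold Spec_heuristique; infer_instance

-- ===== CLAIM (what is proved, stated in full; the proofs are below) =====
def Claim_equal_heuristique : Prop := ∀ (M : List (List Int)), Dom_heuristique M → Pre_heuristique M → Spec_heuristique M (heuristique M)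

-- ===== LEMMAS AND PROOFS =====

-- pull the conditional addition out of a foldl into a map/sum
theorem pv_foldl_ite_add {α : Type} (l : List α) (p : α → Prop) [DecidablePred p]
    (g h : α → Int) (a : Int) :
    l.foldl (fun c x => if p x then c + g x + h x else c) a
      = a + (l.map (fun x => if p x then g x + h x else 0)).sum := by
  induction l generalizing a with
  | nil => simp
  | cons x xs ih =>
      by_cases hp : p x <;> simp only [List.foldl_cons, List.map_cons, List.sum_cons,
        hp, if_true, if_false] <;> rw [ih] <;> ring

-- swap a double sum
theorem pv_sum_swap {α β : Type} (l1 : List α) (l2 : List β) (f : α → β → Int) :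
    (l1.map (fun a => (l2.map (f a)).sum)).sum
      = (l2.map (fun b => (l1.map (fun a => f a b)).sum)).sum := by
  induction l1 with
  | nil => simp [List.map_const']
  | cons x xs ih =>
      simp only [List.map_cons, List.sum_cons, ih, PySem.List.sum_map_add_int]

-- a sum of "match one value" indicators over a Nodup list
theorem pv_sum_indicator {α : Type} [DecidableEq α] (l : List α) (hl : l.Nodup)
    (v : α) (g : α → Int) :
    (l.map (fun i => if v = i then g i else 0)).sum
      = if v ∈ l then g v else 0 := by
  induction l with
  | nil => simp
  | cons x xs ih =>
      simp only [List.nodup_cons] at hl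
      by_cases h : v = x
      · subst h
        simp [ih hl.2, hl.1]
      · simp [h, ih hl.2]

-- rotate a triple sum: innermost index becomes outermost
theorem pv_sum_rot {α β γ : Type} (l1 : List α) (l2 : List β) (l3 : List γ)
    (f : α → β → γ → Int) :
    (l1.map (fun a => (l2.map (fun b => (l3.map (fun c => f a b c)).sum)).sum)).sum
      = (l2.map (fun b => (l3.map (fun c => (l1.map (fun a => f a b c)).sum)).sum)).sum := by
  rw [pv_sum_swap]
  refine congrArg List.sum (List.map_congr_left fun b _ => ?_)
  exact pv_sum_swap l1 l3 (fun a c => f a b c)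

theorem heuristique_spec : Claim_equal_heuristique := by
  intro M _ _
  unfold Spec_heuristique heuristique heuristique_alt
  simp only [PySem.List.enumerate_eq_map_pyRange M ([] : List Int), List.foldl_map,
    pv_foldl_ite_add, PySem.List.foldl_add, zero_add]
  rw [pv_sum_rot]
  refine congrArg List.sum (List.map_congr_left fun k _ => ?_)
  refine congrArg List.sum (List.map_congr_left fun j _ => ?_)
  rw [pv_sum_indicator _ (PySem.List.nodup_pyRange_one 1 _)
        (PySem.List.pyGetD (PySem.List.pyGetD M k []) j 0)]
  simp [PySem.List.mem_pyRange_one]
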